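-- pv_equiv track=rewrite | github.com/zbingf/TclPyHyperWorks | opt_fatigue/using_code/hmCompChange_2021to2017.py | create_hmove
-- ===== SOURCE A (Python) =====
-- def create_hmove(comp_id, elem_ids):
--     line_start = '$HMMOVE'.ljust(8) + f'{comp_id}'.rjust(8) + '\n'
--
--     str1 = '$'.ljust(8)
--     strs = [line_start]
--     for loc, elem_id in enumerate(elem_ids):
--         if loc%9 == 0:
--             strs.append(str1)
--
--         str2 = f'{elem_id}'.rjust(8)
--         strs.append(str2)
--         if loc%9 == 8:
--             strs.append('\n')
--
--     return ''.join(strs)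
-- ===== SOURCE B (Python) =====
-- def create_hmove(comp_id, elem_ids):
--     line_start = '$HMMOVE'.ljust(8) + f'{comp_id}'.rjust(8) + '\n'
--     chunks = [elem_ids[i:i + 9] for i in range(0, len(elem_ids), 9)]
--     lines = ['$'.ljust(8)
--              + ''.join(f'{e}'.rjust(8) for e in chunk)
--              + ('\n' if len(chunk) == 9 else '')
--              for chunk in chunks]
--     return line_start + ''.join(lines)
-- ===== Notes on version B (the rewrite author's own statement) =====
-- stated objective: simpler
-- what changed: A's single flat loop with modular-index tests and a mutable piece list is replaced by grouping elem_ids into chunks of 9 and formatting each chunk as one line (newline only on full chunks), then concatenating.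
import Mathlib
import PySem

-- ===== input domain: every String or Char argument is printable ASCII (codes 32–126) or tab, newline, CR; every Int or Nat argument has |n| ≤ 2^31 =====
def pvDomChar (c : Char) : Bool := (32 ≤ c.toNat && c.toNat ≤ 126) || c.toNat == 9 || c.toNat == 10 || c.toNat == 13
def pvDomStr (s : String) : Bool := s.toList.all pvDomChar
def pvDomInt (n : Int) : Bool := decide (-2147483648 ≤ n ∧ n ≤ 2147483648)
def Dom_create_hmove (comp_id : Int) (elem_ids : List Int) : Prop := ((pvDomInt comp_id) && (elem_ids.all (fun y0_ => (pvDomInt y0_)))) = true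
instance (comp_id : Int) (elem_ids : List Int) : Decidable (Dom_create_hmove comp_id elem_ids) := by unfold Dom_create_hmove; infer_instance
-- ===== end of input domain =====

-- B replaces A's flat modular-index loop by grouping ids into chunks of 9 and formatting each chunk as a line (simpler decomposition).

-- shared formatting helpers (Python's str.ljust / str.rjust with space fill; exact: Nat subtraction clamps like Python's no-pad-if-longer)
def pvLjust8 (cs : List Char) : List Char := cs ++ List.replicate (8 - cs.length) ' '
def pvRjust8 (cs : List Char) : List Char := List.replicate (8 - cs.length) ' ' ++ cs

-- ===== PORT A =====
def create_hmove (comp_id : Int) (elem_ids : List Int) : String :=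
  let lineStart := pvLjust8 "$HMMOVE".toList ++ pvRjust8 (PySem.Int.toChars comp_id) ++ ['\n']
  let str1 := pvLjust8 ['$']
  let strs := (PySem.List.enumerate elem_ids 0).foldl (fun strs p =>
      let strs := if PySem.Int.mod p.1 9 == 0 then strs ++ [str1] else strs
      let strs := strs ++ [pvRjust8 (PySem.Int.toChars p.2)]
      if PySem.Int.mod p.1 9 == 8 then strs ++ [['\n']] else strs) [lineStart]
  String.ofList strs.flatten

-- ===== PORT B =====
-- chunks of 9 consecutive elements (Source B's [elem_ids[i:i+9] for i in range(0, len, 9)])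
def pvChunks9 : List Int → List (List Int)
  | [] => []
  | x :: xs => ((x :: xs).take 9) :: pvChunks9 ((x :: xs).drop 9)
  termination_by xs => xs.length
  decreasing_by simp

def create_hmove_alt (comp_id : Int) (elem_ids : List Int) : String :=
  let lineStart := pvLjust8 "$HMMOVE".toList ++ pvRjust8 (PySem.Int.toChars comp_id) ++ ['\n']
  let line := fun (c : List Int) =>
    pvLjust8 ['$'] ++ (c.map (fun e => pvRjust8 (PySem.Int.toChars e))).flatten
      ++ (if c.length == 9 then ['\n'] else [])
  String.ofList (lineStart ++ ((pvChunks9 elem_ids).map line).flatten)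

-- ===== PRECONDITION & SPEC =====
def Spec_create_hmove (comp_id : Int) (elem_ids : List Int) (out : String) : Prop := out = create_hmove_alt comp_id elem_ids
instance (comp_id : Int) (elem_ids : List Int) (out : String) : Decidable (Spec_create_hmove comp_id elem_ids out) := by unfold Spec_create_hmove; infer_instance

-- ===== CLAIM (what is proved, stated in full; the proofs are below) =====
def Claim_equal_create_hmove : Prop := ∀ (comp_id : Int) (elem_ids : List Int), Dom_create_hmove comp_id elem_ids → Spec_create_hmove comp_id elem_ids (create_hmove comp_id elem_ids)

-- ===== LEMMAS AND PROOFS =====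

def pvRj (e : Int) : List Char := pvRjust8 (PySem.Int.toChars e)

-- common characterisation of the body text after line_start, indexed by position-in-line r = loc % 9
def pvPhi : Nat → List Int → List Char
  | _, [] => []
  | r, x :: xs =>
    (if r = 0 then pvLjust8 ['$'] else []) ++ pvRj x
      ++ (if r = 8 then ['\n'] else []) ++ pvPhi ((r + 1) % 9) xs

theorem pvA_loop (xs : List Int) (s : Int) (hs : 0 ≤ s) (acc : List (List Char)) :
    (((PySem.List.enumerate xs s).foldl (fun strs p =>
      let strs := if PySem.Int.mod p.1 9 == 0 then strs ++ [pvLjust8 ['$']] else strs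
      let strs := strs ++ [pvRjust8 (PySem.Int.toChars p.2)]
      if PySem.Int.mod p.1 9 == 8 then strs ++ [['\n']] else strs) acc).flatten)
    = acc.flatten ++ pvPhi (s % 9).toNat xs := by
  induction xs generalizing s acc with
  | nil => simp [PySem.List.enumerate, pvPhi]
  | cons x xs ih =>
    rw [PySem.List.enumerate_cons]
    simp only [List.foldl_cons]
    rw [ih (s + 1) (by omega)]
    have h9 : ((s + 1) % 9).toNat = ((s % 9).toNat + 1) % 9 := by
      rw [Int.add_emod]; omega
    rw [h9]
    simp only [pvPhi, pvRj]
    have hlo : 0 ≤ s % 9 := Int.emod_nonneg s (by norm_num)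
    have hhi : s % 9 < 9 := Int.emod_lt_of_pos s (by norm_num)
    by_cases hr0 : s % 9 = 0
    · simp [hr0, List.flatten_append, List.append_assoc]
    · by_cases hr8 : s % 9 = 8
      · simp [hr8, List.flatten_append, List.append_assoc]
      · simp [hr8, show ¬ (9:Int) ∣ s by omega,
          show ¬ (s % 9).toNat = 0 by omega, show ¬ (s % 9).toNat = 8 by omega,
          List.flatten_append, List.append_assoc]

theorem pvPhi_mid (xs : List Int) (r : Nat) (h1 : 1 ≤ r) (h2 : r ≤ 8) :
    pvPhi r xs = (xs.take (9 - r)).flatMap pvRj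
      ++ (if 9 - r ≤ xs.length then '\n' :: pvPhi 0 (xs.drop (9 - r)) else []) := by
  induction xs generalizing r with
  | nil => simp [pvPhi]; omega
  | cons x xs ih =>
    rcases Nat.lt_or_ge r 8 with h | h
    · have hr0 : ¬ r = 0 := by omega
      have hr8 : ¬ r = 8 := by omega
      have hstep : (r + 1) % 9 = r + 1 := by omega
      have htake : (9 - r) = (9 - (r + 1)) + 1 := by omega
      simp only [pvPhi, hr0, hr8, ite_false, hstep]
      rw [ih (r + 1) (by omega) (by omega), htake]
      simp only [List.take_succ_cons, List.drop_succ_cons, List.flatMap_cons,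
        List.length_cons]
      have hlen : (9 - (r + 1)) + 1 ≤ xs.length + 1 ↔ 9 - (r + 1) ≤ xs.length := by omega
      by_cases hc : 9 - (r + 1) ≤ xs.length <;> simp [hc, hlen]
    · have hr8 : r = 8 := by omega
      subst hr8
      simp [pvPhi]

theorem pvPhi_chunks (xs : List Int) :
    pvPhi 0 xs = ((pvChunks9 xs).map (fun c =>
      pvLjust8 ['$'] ++ (c.map (fun e => pvRjust8 (PySem.Int.toChars e))).flatten
        ++ (if c.length == 9 then ['\n'] else []))).flatten := by
  induction hn : xs.length using Nat.strong_induction_on generalizing xs with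
  | _ n ih =>
  cases xs with
  | nil => simp [pvPhi, pvChunks9]
  | cons x xs =>
    rw [pvChunks9]
    simp only [List.map_cons, List.flatten_cons]
    have hlt : ((x :: xs).drop 9).length < n := by
      simp only [List.length_drop, List.length_cons] at *; omega
    rw [← ih (((x :: xs).drop 9).length) hlt _ rfl]
    simp only [pvPhi, if_neg (by omega : ¬ (0 : Nat) = 8)]
    rw [pvPhi_mid xs 1 (le_refl 1) (by omega)]
    simp only [List.take_succ_cons, List.drop_succ_cons, List.map_cons,
      List.flatten_cons, List.length_cons]
    have hfm : ∀ (ys : List Int),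
        ys.flatMap pvRj = (ys.map (fun e => pvRjust8 (PySem.Int.toChars e))).flatten := by
      intro ys; rw [List.flatMap_def]; rfl
    by_cases hc : 8 ≤ xs.length
    · have hl : ((x :: xs.take 8).length == 9) = true := by
        simp [List.length_take]; omega
      simp [hc, hl, hfm, List.map_take, pvRj, List.append_assoc]
    · have hl : ¬ ((x :: xs.take 8).length == (9 : Nat)) = true := by
        simp [List.length_take]; omega
      have hd8 : xs.drop 8 = [] := List.drop_eq_nil_of_le (by omega)
      have ht8 : xs.take 8 = xs := List.take_of_length_le (by omega)
      have hd9 : (x :: xs).drop 9 = [] := List.drop_eq_nil_of_le (by simp; omega)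
      simp [hc, hl, hfm, hd8, ht8, hd9, pvChunks9, pvPhi, pvRj, List.append_assoc,
        show ¬ xs.length = 8 by omega]

-- ===== VERDICT (by name: the statement is the Claim_ definition above) =====
theorem create_hmove_spec : Claim_equal_create_hmove := by
  intro comp_id elem_ids _
  unfold Spec_create_hmove create_hmove create_hmove_alt
  dsimp only
  congr 1
  rw [pvA_loop elem_ids 0 (by omega)]
  have h0 : (((0 : Int)) % 9).toNat = 0 := rfl
  rw [h0, pvPhi_chunks]
  simp [List.append_assoc]
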